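-- pv_equiv track=rewrite | github.com/LiXinyuan12345/ACSL | AllStar/Intermediate/Programming/2023_allstar_p2.py | pass2
-- ===== SOURCE A (Python) =====
-- def pass2(param_lines,min_v,max_v):
--
--       sum =0
--       for v in range(min_v,max_v+1):
--             hit = 0
--             for line in param_lines:
--                 for  rng in line:
--                     if rng[0] <= v <= rng[1]:
--                         hit+=1
--                         break
--             if hit==1:
--                 sum += v
--
--       return sum
-- ===== SOURCE B (Python) =====
-- def pass2(param_lines, min_v, max_v):
--     # Sweep line: per line clip ranges to [min_v,max_v], sort and merge them into
--     # disjoint intervals, emit +1/-1 difference events, then one O(1)-per-value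
--     # pass accumulates coverage and sums values covered by exactly one line.
--     events = []
--     for line in param_lines:
--         clipped = []
--         for rng in line:
--             lo = max(rng[0], min_v)
--             hi = min(rng[1], max_v)
--             if lo <= hi:
--                 clipped.append((lo, hi))
--         merged = []
--         cur = None
--         for lo, hi in sorted(clipped, key=lambda r: r[0]):
--             if cur is None:
--                 cur = (lo, hi)
--             elif lo <= cur[1] + 1:
--                 cur = (cur[0], max(cur[1], hi))
--             else:
--                 merged.append(cur)
--                 cur = (lo, hi)
--         if cur is not None:
--             merged.append(cur)
--         for a, b in merged:
--             events.append((a, 1))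
--             events.append((b + 1, -1))
--     diff = {}
--     for k, d in events:
--         diff[k] = diff.get(k, 0) + d
--     total = 0
--     cov = 0
--     for v in range(min_v, max_v + 1):
--         cov += diff.get(v, 0)
--         if cov == 1:
--             total += v
--     return total
-- ===== Notes on version B (the rewrite author's own statement) =====
-- stated objective: alternative
-- what changed: Replaces the per-value scan over all ranges by a sweep line: each line's ranges are clipped, sorted and merged into disjoint intervals, turned into +1/-1 difference events, and one accumulating pass over the value axis sums the values with coverage exactly 1; it trades A's early-exit per-value scan for O(R log R + V) preprocessing, which wins when the value range is large but pays a sort when it is small.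
import Mathlib
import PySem

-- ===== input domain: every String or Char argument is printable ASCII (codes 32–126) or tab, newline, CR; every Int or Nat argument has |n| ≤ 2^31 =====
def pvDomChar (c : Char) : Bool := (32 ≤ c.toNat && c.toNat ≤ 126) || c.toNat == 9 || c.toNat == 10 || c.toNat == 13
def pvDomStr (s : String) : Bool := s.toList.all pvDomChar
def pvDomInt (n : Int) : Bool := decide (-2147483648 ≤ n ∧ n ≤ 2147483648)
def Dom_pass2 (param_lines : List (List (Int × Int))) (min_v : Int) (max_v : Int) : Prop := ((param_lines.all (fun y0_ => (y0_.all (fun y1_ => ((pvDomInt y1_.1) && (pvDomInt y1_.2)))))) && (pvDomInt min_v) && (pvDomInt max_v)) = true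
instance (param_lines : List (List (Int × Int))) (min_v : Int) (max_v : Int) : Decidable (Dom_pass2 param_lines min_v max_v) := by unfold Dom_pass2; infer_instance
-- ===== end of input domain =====

-- B replaces A's per-value scan of every range by a merge-into-disjoint-intervals
-- sweep line with +1/-1 difference events (objective: alternative algorithm).

-- ===== PORT A =====
-- inner 'for rng in line: if …: hit += 1; break'
def pass2HitLine (v : Int) (line : List (Int × Int)) (hit : Int) : Int :=
  match line with
  | [] => hit
  | r :: rest => if r.1 ≤ v ∧ v ≤ r.2 then hit + 1 else pass2HitLine v rest hit

def pass2 (param_lines : List (List (Int × Int))) (min_v : Int) (max_v : Int) : Int :=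
  (PySem.List.pyRange min_v (max_v + 1) 1).foldl
    (fun s v =>
      let hit := param_lines.foldl (fun h line => pass2HitLine v line h) 0
      if hit = (1 : Int) then s + v else s) 0

-- ===== PORT B =====
-- clip the line's ranges to [min_v,max_v], dropping empty ones
def pass2Clip (min_v max_v : Int) (line : List (Int × Int)) : List (Int × Int) :=
  line.foldl (fun cl rng =>
    let lo := max rng.1 min_v
    let hi := min rng.2 max_v
    if lo ≤ hi then cl ++ [(lo, hi)] else cl) []

-- one step of the per-line merge loop (state: merged list so far, current open interval)
def pass2MergeStep (st : List (Int × Int) × Option (Int × Int))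
    (rng : Int × Int) : List (Int × Int) × Option (Int × Int) :=
  match st.2 with
  | none => (st.1, some rng)
  | some c =>
    if rng.1 ≤ c.2 + 1 then (st.1, some (c.1, max c.2 rng.2))
    else (st.1 ++ [c], some rng)

def pass2MergeLine (min_v max_v : Int) (line : List (Int × Int)) : List (Int × Int) :=
  let st := (PySem.List.sorted (pass2Clip min_v max_v line) (fun r => r.1) false).foldl
    pass2MergeStep ([], none)
  match st.2 with
  | none => st.1
  | some c => st.1 ++ [c]

def pass2_alt (param_lines : List (List (Int × Int))) (min_v : Int) (max_v : Int) : Int :=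
  let events := param_lines.foldl
    (fun ev line => (pass2MergeLine min_v max_v line).foldl
      (fun ev2 p => ev2 ++ [(p.1, (1 : Int)), (p.2 + 1, (-1 : Int))]) ev) []
  let diff := events.foldl
    (fun (d : PySem.Dict Int Int) kd => d.insert kd.1 (d.getD kd.1 0 + kd.2)) PySem.Dict.empty
  let res := (PySem.List.pyRange min_v (max_v + 1) 1).foldl
    (fun (st : Int × Int) v =>
      let cov := st.1 + diff.getD v 0
      (cov, if cov = (1 : Int) then st.2 + v else st.2)) (0, 0)
  res.2

-- ===== PRECONDITION & SPEC =====
def Spec_pass2 (param_lines : List (List (Int × Int))) (min_v : Int) (max_v : Int) (out : Int) : Prop := out = pass2_alt param_lines min_v max_v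
instance (param_lines : List (List (Int × Int))) (min_v : Int) (max_v : Int) (out : Int) : Decidable (Spec_pass2 param_lines min_v max_v out) := by unfold Spec_pass2; infer_instance

-- ===== CLAIM (what is proved, stated in full; the proofs are below) =====
def Claim_equal_pass2 : Prop := ∀ (param_lines : List (List (Int × Int))) (min_v : Int) (max_v : Int), Dom_pass2 param_lines min_v max_v → Spec_pass2 param_lines min_v max_v (pass2 param_lines min_v max_v)

-- ===== LEMMAS AND PROOFS =====

-- does some range of `line` cover v?
def pvCov (line : List (Int × Int)) (v : Int) : Bool := line.any (fun r => decide (r.1 ≤ v ∧ v ≤ r.2))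

-- the reference count: number of lines covering v
def pvC (param_lines : List (List (Int × Int))) (v : Int) : Int :=
  (param_lines.countP (fun line => pvCov line v) : Int)

-- A computes the reference sum
lemma hitLine_eq (v : Int) (line : List (Int × Int)) (h : Int) :
    pass2HitLine v line h = h + (if pvCov line v then 1 else 0) := by
  induction line with
  | nil => simp [pass2HitLine, pvCov]
  | cons r rest ih =>
    simp only [pass2HitLine, pvCov, List.any_cons]
    by_cases hr : r.1 ≤ v ∧ v ≤ r.2
    · simp [hr]
    · have hd : decide (r.1 ≤ v ∧ v ≤ r.2) = false := by simpa using hr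
      rw [if_neg hr, ih]
      simp only [pvCov, hd, Bool.false_or]
      rfl

lemma pass2_eq_ref (param_lines : List (List (Int × Int))) (min_v max_v : Int) :
    pass2 param_lines min_v max_v =
      ((PySem.List.pyRange min_v (max_v + 1) 1).map
        (fun v => if pvC param_lines v = 1 then v else 0)).sum := by
  unfold pass2
  have hin : ∀ v : Int,
      List.foldl (fun h line => pass2HitLine v line h) 0 param_lines = pvC param_lines v := by
    intro v
    calc List.foldl (fun h line => pass2HitLine v line h) 0 param_lines
        = List.foldl (fun h line => h + (if pvCov line v then (1:Int) else 0)) 0 param_lines :=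
          PySem.List.foldl_congr_mem _ _ _ _ (fun acc x _ => hitLine_eq v x acc)
      _ = 0 + ((param_lines.map (fun line => if pvCov line v then (1:Int) else 0)).sum) :=
          PySem.List.foldl_add _ _ _
      _ = pvC param_lines v := by rw [PySem.List.sum_map_ite_one_zero]; simp [pvC]
  calc List.foldl (fun s v =>
          let hit := List.foldl (fun h line => pass2HitLine v line h) 0 param_lines
          if hit = (1:Int) then s + v else s) 0 (PySem.List.pyRange min_v (max_v + 1) 1)
      = List.foldl (fun s v => s + (if pvC param_lines v = 1 then v else 0)) 0
          (PySem.List.pyRange min_v (max_v + 1) 1) :=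
        PySem.List.foldl_congr_mem _ _ _ _ (fun acc v _ => by
          simp only [hin v]; split <;> simp)
    _ = ((PySem.List.pyRange min_v (max_v + 1) 1).map
          (fun v => if pvC param_lines v = 1 then v else 0)).sum := by
        rw [PySem.List.foldl_add]; simp

-- ---------- B side ----------

-- finalize the merge state
def pvFin (st : List (Int × Int) × Option (Int × Int)) : List (Int × Int) :=
  match st.2 with
  | none => st.1
  | some c => st.1 ++ [c]

-- well-formed merged interval list: clipped to [min_v,max_v], nonempty, separated by gaps
def pvGood (min_v max_v : Int) (M : List (Int × Int)) : Prop :=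
  (∀ p ∈ M, min_v ≤ p.1 ∧ p.1 ≤ p.2 ∧ p.2 ≤ max_v) ∧ M.Pairwise (fun p q => p.2 + 1 < q.1)

def pvEvents (param_lines : List (List (Int × Int))) (min_v max_v : Int) : List (Int × Int) :=
  param_lines.flatMap (fun line =>
    (pass2MergeLine min_v max_v line).flatMap (fun p => [(p.1, (1 : Int)), (p.2 + 1, (-1 : Int))]))

-- prefix sum of the difference events up to v, and the point mass at v
def pvP (es : List (Int × Int)) (v : Int) : Int :=
  (es.map (fun kd => if kd.1 ≤ v then kd.2 else 0)).sum
def pvE (es : List (Int × Int)) (v : Int) : Int :=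
  (es.map (fun kd => if kd.1 = v then kd.2 else 0)).sum

lemma mergeGo (min_v max_v : Int) :
    ∀ (xs acc : List (Int × Int)) (cur : Option (Int × Int)),
      xs.Pairwise (fun a b => a.1 ≤ b.1) →
      (∀ r ∈ xs, min_v ≤ r.1 ∧ r.1 ≤ r.2 ∧ r.2 ≤ max_v) →
      pvGood min_v max_v (pvFin (acc, cur)) →
      (∀ c, cur = some c → ∀ r ∈ xs, c.1 ≤ r.1) →
      (cur = none → acc = []) →
      pvGood min_v max_v (pvFin (xs.foldl pass2MergeStep (acc, cur))) ∧
      (∀ v, pvCov (pvFin (xs.foldl pass2MergeStep (acc, cur))) v =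
          (pvCov (pvFin (acc, cur)) v || pvCov xs v)) := by
  intro xs
  induction xs with
  | nil =>
    intro acc cur _ _ hg _ _
    exact ⟨hg, fun v => by simp [pvCov]⟩
  | cons r t ih =>
    intro acc cur hpw hbnd hg hb hn
    rw [List.pairwise_cons] at hpw
    obtain ⟨hrt, hpw'⟩ := hpw
    have hbr := hbnd r (List.mem_cons_self ..)
    have hbnd' : ∀ q ∈ t, min_v ≤ q.1 ∧ q.1 ≤ q.2 ∧ q.2 ≤ max_v :=
      fun q hq => hbnd q (List.mem_cons_of_mem _ hq)
    rw [List.foldl_cons]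
    cases cur with
    | none =>
      have hacc : acc = [] := hn rfl
      subst hacc
      have hstep : pass2MergeStep (([] : List (Int × Int)), none) r = ([], some r) := rfl
      rw [hstep]
      obtain ⟨g1, g2⟩ := ih [] (some r) hpw' hbnd'
        (by constructor
            · intro p hp
              simp only [pvFin, List.nil_append, List.mem_singleton] at hp
              subst hp
              exact hbr
            · simp [pvFin])
        (by intro c' hc q hq
            injection hc with hc
            subst hc
            exact hrt q hq)
        (by intro h; cases h)
      refine ⟨g1, fun v => ?_⟩
      rw [g2 v]
      simp only [pvFin, pvCov, List.any_cons, List.any_nil, List.nil_append,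
        Bool.or_false, Bool.false_or]
    | some c =>
      have hgc : min_v ≤ c.1 ∧ c.1 ≤ c.2 ∧ c.2 ≤ max_v :=
        hg.1 c (by simp [pvFin])
      have hgacc : ∀ p ∈ acc, min_v ≤ p.1 ∧ p.1 ≤ p.2 ∧ p.2 ≤ max_v := by
        intro p hp
        exact hg.1 p (by simp [pvFin, hp])
      have hpair := hg.2
      simp only [pvFin] at hpair
      rw [List.pairwise_append] at hpair
      have hgapc : ∀ p ∈ acc, p.2 + 1 < c.1 := by
        intro p hp
        exact hpair.2.2 p hp c (List.mem_singleton_self _)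
      have hbc : c.1 ≤ r.1 := hb c rfl r (List.mem_cons_self ..)
      by_cases hle : r.1 ≤ c.2 + 1
      · -- merge into current interval
        have hstep : pass2MergeStep (acc, some c) r = (acc, some (c.1, max c.2 r.2)) := by
          simp only [pass2MergeStep]
          rw [if_pos hle]
        rw [hstep]
        obtain ⟨g1, g2⟩ := ih acc (some (c.1, max c.2 r.2)) hpw' hbnd'
          (by constructor
              · intro p hp
                simp only [pvFin, List.mem_append, List.mem_singleton] at hp
                rcases hp with hp | rfl
                · exact hgacc p hp
                · exact ⟨hgc.1, by omega, by omega⟩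
              · simp only [pvFin]
                rw [List.pairwise_append]
                refine ⟨hpair.1, List.pairwise_singleton _ _, ?_⟩
                intro p hp q hq
                rw [List.mem_singleton] at hq
                subst hq
                exact hgapc p hp)
          (by intro c' hc q hq
              injection hc with hc
              subst hc
              have := hrt q hq
              simp only
              omega)
          (by intro h; cases h)
        refine ⟨g1, fun v => ?_⟩
        rw [g2 v]
        have hcomb : decide (c.1 ≤ v ∧ v ≤ max c.2 r.2)
            = (decide (c.1 ≤ v ∧ v ≤ c.2) || decide (r.1 ≤ v ∧ v ≤ r.2)) := by
          rw [Bool.eq_iff_iff]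
          simp only [Bool.or_eq_true, decide_eq_true_eq]
          omega
        simp only [pvFin, pvCov, List.any_append, List.any_cons, List.any_nil, hcomb]
        simp only [Bool.or_false]
        cases acc.any fun p => decide (p.1 ≤ v ∧ v ≤ p.2) <;>
          cases decide (c.1 ≤ v ∧ v ≤ c.2) <;>
          cases decide (r.1 ≤ v ∧ v ≤ r.2) <;>
          cases t.any fun p => decide (p.1 ≤ v ∧ v ≤ p.2) <;> rfl
      · -- gap: emit current interval, start a new one
        have hstep : pass2MergeStep (acc, some c) r = (acc ++ [c], some r) := by
          simp only [pass2MergeStep]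
          rw [if_neg hle]
        rw [hstep]
        obtain ⟨g1, g2⟩ := ih (acc ++ [c]) (some r) hpw' hbnd'
          (by constructor
              · intro p hp
                simp only [pvFin, List.mem_append, List.mem_singleton] at hp
                rcases hp with (hp | rfl) | rfl
                · exact hgacc p hp
                · exact hgc
                · exact hbr
              · simp only [pvFin]
                rw [List.pairwise_append]
                refine ⟨?_, List.pairwise_singleton _ _, ?_⟩
                · rw [List.pairwise_append]
                  refine ⟨hpair.1, List.pairwise_singleton _ _, ?_⟩
                  intro p hp q hq
                  rw [List.mem_singleton] at hq
                  subst hq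
                  exact hgapc p hp
                · intro p hp q hq
                  rw [List.mem_singleton] at hq
                  subst hq
                  rw [List.mem_append, List.mem_singleton] at hp
                  rcases hp with hp | rfl
                  · have := hgapc p hp
                    omega
                  · omega)
          (by intro c' hc q hq
              injection hc with hc
              subst hc
              exact hrt q hq)
          (by intro h; cases h)
        refine ⟨g1, fun v => ?_⟩
        rw [g2 v]
        simp only [pvFin, pvCov, List.any_append, List.any_cons, List.any_nil]
        cases acc.any fun p => decide (p.1 ≤ v ∧ v ≤ p.2) <;>
          cases decide (c.1 ≤ v ∧ v ≤ c.2) <;>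
          cases decide (r.1 ≤ v ∧ v ≤ r.2) <;>
          cases t.any fun p => decide (p.1 ≤ v ∧ v ≤ p.2) <;> rfl

lemma mergeLine_spec (min_v max_v : Int) (line : List (Int × Int)) :
    pvGood min_v max_v (pass2MergeLine min_v max_v line) ∧
    (∀ v, min_v ≤ v → v ≤ max_v →
      pvCov (pass2MergeLine min_v max_v line) v = pvCov line v) := by
  have hclip : pass2Clip min_v max_v line
      = (line.filter (fun rng => decide (max rng.1 min_v ≤ min rng.2 max_v))).map
          (fun rng => (max rng.1 min_v, min rng.2 max_v)) := by
    simp only [pass2Clip]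
    exact PySem.List.foldl_append_ite
      (fun rng : Int × Int => max rng.1 min_v ≤ min rng.2 max_v)
      (fun rng : Int × Int => (max rng.1 min_v, min rng.2 max_v)) line []
  have hmemclip : ∀ q ∈ pass2Clip min_v max_v line,
      min_v ≤ q.1 ∧ q.1 ≤ q.2 ∧ q.2 ≤ max_v := by
    intro q hq
    rw [hclip] at hq
    simp only [List.mem_map, List.mem_filter, decide_eq_true_eq] at hq
    obtain ⟨rng, ⟨_, hle⟩, rfl⟩ := hq
    refine ⟨le_max_right _ _, hle, min_le_right _ _⟩
  have hpw : (PySem.List.sorted (pass2Clip min_v max_v line) (fun r => r.1) false).Pairwise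
      (fun a b => a.1 ≤ b.1) :=
    PySem.List.sorted_pairwise (pass2Clip min_v max_v line) (fun r => r.1)
  have hperm := PySem.List.sorted_perm (pass2Clip min_v max_v line) (fun r => r.1) false
  have h := mergeGo min_v max_v
    (PySem.List.sorted (pass2Clip min_v max_v line) (fun r => r.1) false) [] none hpw
    (fun q hq => hmemclip q (hperm.mem_iff.mp hq))
    (by constructor <;> simp [pvFin])
    (by intro c hc; cases hc)
    (fun _ => rfl)
  have hfin : pass2MergeLine min_v max_v line
      = pvFin ((PySem.List.sorted (pass2Clip min_v max_v line) (fun r => r.1) false).foldl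
          pass2MergeStep ([], none)) := rfl
  constructor
  · rw [hfin]; exact h.1
  · intro v h1 h2
    rw [hfin, h.2 v]
    simp only [pvFin, pvCov, List.any_nil, Bool.false_or]
    -- sorted clipped list covers v iff the original line does (for v in the window)
    rw [Bool.eq_iff_iff]
    simp only [List.any_eq_true]
    constructor
    · rintro ⟨p, hp, hc⟩
      have hp' := hperm.mem_iff.mp hp
      rw [hclip] at hp'
      simp only [List.mem_map, List.mem_filter, decide_eq_true_eq] at hp'
      obtain ⟨rng, ⟨hrm, _⟩, rfl⟩ := hp'
      refine ⟨rng, hrm, ?_⟩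
      simp only [decide_eq_true_eq] at hc ⊢
      omega
    · rintro ⟨rng, hrm, hc⟩
      simp only [decide_eq_true_eq] at hc
      refine ⟨(max rng.1 min_v, min rng.2 max_v), hperm.mem_iff.mpr ?_, ?_⟩
      · rw [hclip]
        simp only [List.mem_map, List.mem_filter, decide_eq_true_eq]
        exact ⟨rng, ⟨hrm, by omega⟩, rfl⟩
      · simp only [decide_eq_true_eq]
        omega

-- sum over a gap-separated list of the ±1 endpoint indicators is the coverage indicator
lemma chainZero (v : Int) (M : List (Int × Int)) (hab : ∀ p ∈ M, p.1 ≤ p.2)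
    (hlt : ∀ p ∈ M, v < p.1) :
    (M.map (fun p => (if p.1 ≤ v then (1 : Int) else 0) + (if p.2 + 1 ≤ v then (-1 : Int) else 0))).sum = 0
      ∧ pvCov M v = false := by
  constructor
  · apply List.sum_eq_zero
    intro x hx
    simp only [List.mem_map] at hx
    obtain ⟨p, hp, rfl⟩ := hx
    have h1 := hab p hp
    have h2 := hlt p hp
    rw [if_neg (by omega), if_neg (by omega)]
    ring
  · simp only [pvCov, List.any_eq_false]
    intro p hp
    have h2 := hlt p hp
    simp only [decide_eq_true_eq, not_and]
    omega

lemma chainSum (v : Int) :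
    ∀ (M : List (Int × Int)), (∀ p ∈ M, p.1 ≤ p.2) → M.Pairwise (fun p q => p.2 + 1 < q.1) →
    (M.map (fun p => (if p.1 ≤ v then (1 : Int) else 0) + (if p.2 + 1 ≤ v then (-1 : Int) else 0))).sum
      = if pvCov M v then 1 else 0 := by
  intro M
  induction M with
  | nil => intro _ _; simp [pvCov]
  | cons p t ih =>
    intro hab hpw
    rw [List.pairwise_cons] at hpw
    obtain ⟨hpt, hpw'⟩ := hpw
    have habt : ∀ q ∈ t, q.1 ≤ q.2 := fun q hq => hab q (List.mem_cons_of_mem _ hq)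
    have habp : p.1 ≤ p.2 := hab p (List.mem_cons_self ..)
    simp only [List.map_cons, List.sum_cons, pvCov, List.any_cons]
    by_cases hv1 : p.1 ≤ v
    · by_cases hv2 : v ≤ p.2
      · have hz := chainZero v t habt (fun q hq => by have := hpt q hq; omega)
        rw [hz.1, if_pos hv1, if_neg (by omega)]
        simp only [pvCov] at hz
        simp only [hz.2]
        have : decide (p.1 ≤ v ∧ v ≤ p.2) = true := by simp [hv1, hv2]
        simp [this]
      · rw [if_pos hv1, if_pos (by omega), ih habt hpw']
        have : decide (p.1 ≤ v ∧ v ≤ p.2) = false := by simp; omega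
        simp only [pvCov, this, Bool.false_or]
        split <;> ring
    · have hz := chainZero v t habt (fun q hq => by have := hpt q hq; omega)
      rw [hz.1, if_neg hv1, if_neg (by omega)]
      simp only [pvCov] at hz
      simp only [hz.2]
      have : decide (p.1 ≤ v ∧ v ≤ p.2) = false := by simp; omega
      simp [this]

lemma sum_map_flatMap {α β : Type} (g : α → List β) (f : β → Int) (l : List α) :
    ((l.flatMap g).map f).sum = (l.map (fun x => ((g x).map f).sum)).sum := by
  induction l with
  | nil => rfl
  | cons x t ih => simp [List.flatMap_cons, List.map_append, List.sum_append, ih]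

lemma events_eq (param_lines : List (List (Int × Int))) (min_v max_v : Int) :
    param_lines.foldl
      (fun ev line => (pass2MergeLine min_v max_v line).foldl
        (fun ev2 p => ev2 ++ [(p.1, (1 : Int)), (p.2 + 1, (-1 : Int))]) ev) []
      = pvEvents param_lines min_v max_v := by
  rw [PySem.List.foldl_congr_mem _ _
    (fun ev line => ev ++ (pass2MergeLine min_v max_v line).flatMap
      (fun p => [(p.1, (1 : Int)), (p.2 + 1, (-1 : Int))])) _
    (by intro acc line _
        exact PySem.List.foldl_append_eq_flatMap _ _ _)]
  rw [PySem.List.foldl_append_eq_flatMap]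
  simp [pvEvents]

lemma diff_getD (v : Int) :
    ∀ (es : List (Int × Int)) (d : PySem.Dict Int Int),
    (es.foldl (fun (d : PySem.Dict Int Int) kd => d.insert kd.1 (d.getD kd.1 0 + kd.2)) d).getD v 0
      = d.getD v 0 + pvE es v := by
  intro es
  induction es with
  | nil => intro d; simp [pvE]
  | cons kd t ih =>
    intro d
    simp only [List.foldl_cons, ih, pvE, List.map_cons, List.sum_cons]
    by_cases hk : kd.1 = v
    · subst hk
      rw [PySem.Dict.getD_insert_self]
      simp only [if_true]
      ring
    · rw [PySem.Dict.getD_insert_of_ne _ _ _ (fun h => hk h.symm)]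
      simp only [if_neg hk]
      ring

lemma E_eq_P_sub (es : List (Int × Int)) (v : Int) :
    pvE es v = pvP es v - pvP es (v - 1) := by
  induction es with
  | nil => simp [pvE, pvP]
  | cons kd t ih =>
    simp only [pvE, pvP, List.map_cons, List.sum_cons] at *
    rw [ih]
    have : (if kd.1 = v then kd.2 else 0)
        = (if kd.1 ≤ v then kd.2 else 0) - (if kd.1 ≤ v - 1 then kd.2 else 0) := by
      split_ifs <;> omega
    rw [this]; ring

lemma P_before (es : List (Int × Int)) (min_v v : Int)
    (hk : ∀ kd ∈ es, min_v ≤ kd.1) (hv : v < min_v) : pvP es v = 0 := by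
  unfold pvP
  apply List.sum_eq_zero
  intro x hx
  simp only [List.mem_map] at hx
  obtain ⟨kd, hkd, rfl⟩ := hx
  have := hk kd hkd
  simp only [if_neg (by omega : ¬ kd.1 ≤ v)]

lemma events_keys_ge (param_lines : List (List (Int × Int))) (min_v max_v : Int) :
    ∀ kd ∈ pvEvents param_lines min_v max_v, min_v ≤ kd.1 := by
  intro kd hkd
  simp only [pvEvents, List.mem_flatMap] at hkd
  obtain ⟨line, _, p, hp, hmem⟩ := hkd
  have hg := (mergeLine_spec min_v max_v line).1.1 p hp
  simp only [List.mem_cons] at hmem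
  rcases hmem with rfl | rfl | h
  · simpa using hg.1
  · simp only
    omega
  · cases h

lemma P_eq_C (param_lines : List (List (Int × Int))) (min_v max_v v : Int)
    (h1 : min_v ≤ v) (h2 : v ≤ max_v) :
    pvP (pvEvents param_lines min_v max_v) v = pvC param_lines v := by
  unfold pvP pvEvents
  rw [sum_map_flatMap]
  have hline : ∀ line ∈ param_lines,
      (((pass2MergeLine min_v max_v line).flatMap
          (fun p => [(p.1, (1 : Int)), (p.2 + 1, (-1 : Int))])).map
        (fun kd => if kd.1 ≤ v then kd.2 else 0)).sum
      = if pvCov line v then 1 else 0 := by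
    intro line _
    rw [sum_map_flatMap]
    obtain ⟨hg, hcov⟩ := mergeLine_spec min_v max_v line
    have hcs := chainSum v (pass2MergeLine min_v max_v line)
      (fun p hp => (hg.1 p hp).2.1) hg.2
    rw [← hcov v h1 h2, ← hcs]
    congr 1
    apply List.map_congr_left
    intro p _
    simp
  rw [List.map_congr_left hline, PySem.List.sum_map_ite_one_zero]
  rfl

lemma sweep (es : List (Int × Int)) (hi : Int) :
    ∀ (n : Nat) (u c t : Int), (hi - u).toNat = n → c = pvP es (u - 1) →
    (List.foldl (fun (st : Int × Int) v =>
        let cov := st.1 + pvE es v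
        (cov, if cov = (1 : Int) then st.2 + v else st.2)) (c, t)
      (PySem.List.pyRange u hi 1)).2
      = t + ((PySem.List.pyRange u hi 1).map (fun v => if pvP es v = 1 then v else 0)).sum := by
  intro n
  induction n with
  | zero =>
    intro u c t hn _
    rw [PySem.List.pyRange_one_eq_nil (by omega)]
    simp
  | succ m ih =>
    intro u c t hn hc
    rw [PySem.List.pyRange_one_cons (by omega)]
    simp only [List.foldl_cons, List.map_cons, List.sum_cons]
    have hcov : c + pvE es u = pvP es u := by
      rw [hc, E_eq_P_sub]; ring
    rw [ih (u + 1) (c + pvE es u) _ (by omega) (by rw [hcov]; ring_nf)]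
    rw [hcov]
    split <;> ring

lemma pass2_alt_eq_ref (param_lines : List (List (Int × Int))) (min_v max_v : Int) :
    pass2_alt param_lines min_v max_v =
      ((PySem.List.pyRange min_v (max_v + 1) 1).map
        (fun v => if pvC param_lines v = 1 then v else 0)).sum := by
  simp only [pass2_alt]
  rw [events_eq]
  have hes := events_keys_ge param_lines min_v max_v
  set es := pvEvents param_lines min_v max_v with hesdef
  rw [PySem.List.foldl_congr_mem _ _
    (fun (st : Int × Int) v =>
      let cov := st.1 + pvE es v
      (cov, if cov = (1 : Int) then st.2 + v else st.2)) _
    (by intro st v _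
        simp only [diff_getD, PySem.Dict.getD_empty, zero_add])]
  rw [sweep es (max_v + 1) (max_v + 1 - min_v).toNat min_v 0 0 rfl
    (by rw [P_before es min_v (min_v - 1) hes (by omega)])]
  rw [zero_add]
  apply congrArg
  apply List.map_congr_left
  intro v hv
  rw [PySem.List.mem_pyRange_one] at hv
  rw [P_eq_C param_lines min_v max_v v hv.1 (by omega)]

-- ===== VERDICT (by name: the statement is the Claim_ definition above) =====
theorem pass2_spec : Claim_equal_pass2 := by
  intro param_lines min_v max_v _
  unfold Spec_pass2
  rw [pass2_eq_ref, pass2_alt_eq_ref]
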